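-- pv_equiv track=rewrite | github.com/taole33/programming-contest-challenge-book | 08two_two_greedy_algorithm(best_cow_line)/two_two_greedy_algorithm_bestcowline.py | main_method
-- ===== SOURCE A (Python) =====
-- def main_method(N,S):
--
--     #変数の宣言
--     start_position = 0
--     end_position = N-1
--     output_T = []
--
--     while start_position <= end_position:
--         left_judge = False
--         i = 0
--         #左から見た場合(S)と右から見た場合(S')を比較
--         #==のときはbreakしないので
--         #同じ文字列が続いた場合であっても、先頭と末尾、どちらが小さくなるか判定できる
--         while start_position + i <= end_position:
--             if S[start_position + i] < S[end_position - i]: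
--                 left_judge = True
--                 break
--
--             elif S[start_position + i] > S[end_position-i]:
--                 left_judge = False
--                 break
--
--             i = i + 1
--
--         #Sのほうが小さいなら、S[i]を出力、そうでないならS'[i]を出力
--         if left_judge:
--             output_T.append(S[start_position])
--             start_position = start_position + 1
--         else:
--             output_T.append(S[end_position])
--             end_position = end_position - 1
--
--
--     answer = ''.join(output_T)
--     return answer
-- ===== SOURCE B (Python) =====
-- def main_method(N, S):
--     t = S[:N] if N > 0 else ""
--     out = []
--     while t:
--         if t < t[::-1]:
--             out.append(t[0])
--             t = t[1:]
--         else: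
--             out.append(t[-1])
--             t = t[:-1]
--     return ''.join(out)
-- ===== Notes on version B (the rewrite author's own statement) =====
-- stated objective: alternative
-- what changed: A steers two indices over S with a hand-written char-by-char inner comparison loop; B keeps the remaining substring itself and at each step compares it as a whole with its reverse (Python's built-in lexicographic <), emitting the front or back character and shrinking the string.
-- outside the precondition, e.g. on main_method(3, 'ab'): A raises IndexError, B returns 'ab'
import Mathlib
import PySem

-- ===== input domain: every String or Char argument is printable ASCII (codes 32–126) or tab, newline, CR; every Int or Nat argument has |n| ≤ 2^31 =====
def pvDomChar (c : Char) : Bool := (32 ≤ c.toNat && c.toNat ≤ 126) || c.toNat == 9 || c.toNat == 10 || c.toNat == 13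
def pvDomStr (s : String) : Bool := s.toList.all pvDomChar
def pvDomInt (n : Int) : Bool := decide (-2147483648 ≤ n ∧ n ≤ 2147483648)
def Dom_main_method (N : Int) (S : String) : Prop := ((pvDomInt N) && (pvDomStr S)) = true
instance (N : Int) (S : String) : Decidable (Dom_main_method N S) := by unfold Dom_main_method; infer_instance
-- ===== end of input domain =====

-- B rewrites A's index-juggling double loop as a whole-substring greedy (compare the
-- remaining substring with its reverse, emit one end); objective: alternative.

-- ===== PORT A =====
-- inner while loop of A: returns left_judge
def pvInnerA (s : List Char) (sp ep i : Int) : Bool :=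
  if _h : sp + i ≤ ep then
    match PySem.List.pyGet? s (sp + i), PySem.List.pyGet? s (ep - i) with
    | some a, some b =>
      if a < b then true
      else if b < a then false
      else pvInnerA s sp ep (i + 1)
    | _, _ => false   -- Python raises IndexError here; excluded by Pre_
  else false
termination_by (ep + 1 - (sp + i)).toNat
decreasing_by omega

-- outer while loop of A, accumulating output_T
def pvOuterA (s : List Char) (sp ep : Int) (acc : List Char) : List Char :=
  if _h : sp ≤ ep then
    if pvInnerA s sp ep 0 then
      match PySem.List.pyGet? s sp with
      | some c => pvOuterA s (sp + 1) ep (acc ++ [c])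
      | none => acc   -- IndexError; excluded by Pre_
    else
      match PySem.List.pyGet? s ep with
      | some c => pvOuterA s sp (ep - 1) (acc ++ [c])
      | none => acc   -- IndexError; excluded by Pre_
  else acc
termination_by (ep + 1 - sp).toNat
decreasing_by all_goals omega

def main_method (N : Int) (S : String) : String :=
  String.mk (pvOuterA S.toList 0 (N - 1) [])

-- ===== PORT B =====
-- Python list/str '<' (lexicographic; here always used on equal-length lists)
def pvLexLt : List Char → List Char → Bool
  | _, [] => false
  | [], _ :: _ => true
  | a :: as, b :: bs => if a < b then true else if b < a then false else pvLexLt as bs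

-- Source B's while loop: t compared with t[::-1]; emit t[0] or t[-1]
def pvGoB : List Char → List Char
  | [] => []
  | c :: rest =>
    if pvLexLt (c :: rest) (c :: rest).reverse then
      c :: pvGoB rest
    else
      (c :: rest).getLast (by simp) :: pvGoB (c :: rest).dropLast
termination_by t => t.length
decreasing_by all_goals simp

def main_method_alt (N : Int) (S : String) : String :=
  String.mk (pvGoB (if 0 < N then S.toList.take N.toNat else []))

-- ===== PRECONDITION & SPEC =====
-- Pre_ excludes N > len(S) (there A's indexing S[end_position - i] raises IndexError).
def Pre_main_method (N : Int) (S : String) : Prop := N ≤ (S.toList.length : Int)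
instance (N : Int) (S : String) : Decidable (Pre_main_method N S) := by unfold Pre_main_method; infer_instance
def pvWitness_main_method : Int × String := (4, "acdb")

def Spec_main_method (N : Int) (S : String) (out : String) : Prop := out = main_method_alt N S
instance (N : Int) (S : String) (out : String) : Decidable (Spec_main_method N S out) := by unfold Spec_main_method; infer_instance

-- ===== CLAIM (what is proved, stated in full; the proofs are below) =====
def Claim_equal_main_method : Prop := ∀ (N : Int) (S : String), Dom_main_method N S → Pre_main_method N S → Spec_main_method N S (main_method N S)

-- ===== LEMMAS AND PROOFS =====

-- the substring S[sp..ep] that A's indices range over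
def pvSeg (s : List Char) (sp ep : Int) : List Char :=
  (s.drop sp.toNat).take (ep + 1 - sp).toNat

theorem pvSeg_length (s : List Char) (sp ep : Int) (h0 : 0 ≤ sp) (hlen : ep < (s.length : Int)) :
    (pvSeg s sp ep).length = (ep + 1 - sp).toNat := by
  simp [pvSeg]
  omega

theorem pvSeg_getElem (s : List Char) (sp ep : Int) (_h0 : 0 ≤ sp)
    (j : Nat) (hj : j < (pvSeg s sp ep).length) :
    (pvSeg s sp ep)[j] = s[sp.toNat + j]'(by simp [pvSeg] at hj; omega) := by
  simp only [pvSeg, List.getElem_take, List.getElem_drop]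

theorem pvInnerA_eq_lex (s : List Char) (sp ep : Int) (h0 : 0 ≤ sp) (hlen : ep < (s.length : Int))
    (i : Nat) :
    pvInnerA s sp ep (i : Int) =
      pvLexLt ((pvSeg s sp ep).drop i) ((pvSeg s sp ep).reverse.drop i) := by
  have hn := pvSeg_length s sp ep h0 hlen
  induction hd : (ep + 1 - sp).toNat - i generalizing i with
  | zero =>
    have hni : (pvSeg s sp ep).length ≤ i := by omega
    have hcase : ¬ (sp + (i : Int) ≤ ep) := by omega
    unfold pvInnerA
    rw [dif_neg hcase, List.drop_eq_nil_of_le hni,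
      List.drop_eq_nil_of_le (by simpa using hni)]
    rfl
  | succ k ih =>
    have hi : i < (pvSeg s sp ep).length := by omega
    have hcase : sp + (i : Int) ≤ ep := by omega
    unfold pvInnerA
    rw [dif_pos hcase]
    have hg1 : PySem.List.pyGet? s (sp + (i : Int)) =
        some (s[(sp + (i : Int)).toNat]'(by omega)) := by
      rw [PySem.List.pyGet?_eq_some_getElem s (i := sp + (i : Int)) (by omega) (by omega)]
    have hg2 : PySem.List.pyGet? s (ep - (i : Int)) =
        some (s[(ep - (i : Int)).toNat]'(by omega)) := by
      rw [PySem.List.pyGet?_eq_some_getElem s (i := ep - (i : Int)) (by omega) (by omega)]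
    rw [hg1, hg2]
    have hir : i < (pvSeg s sp ep).reverse.length := by simpa using hi
    rw [List.drop_eq_getElem_cons hi, List.drop_eq_getElem_cons hir]
    have e1 : s[(sp + (i : Int)).toNat]'(by omega) = (pvSeg s sp ep)[i] := by
      rw [pvSeg_getElem s sp ep h0 i hi]
      congr 1
      omega
    have e2 : s[(ep - (i : Int)).toNat]'(by omega) = (pvSeg s sp ep).reverse[i] := by
      rw [List.getElem_reverse]
      rw [pvSeg_getElem s sp ep h0 ((pvSeg s sp ep).length - 1 - i) (by omega)]
      congr 1
      omega
    rw [e1, e2]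
    show (if (pvSeg s sp ep)[i] < (pvSeg s sp ep).reverse[i] then true
          else if (pvSeg s sp ep).reverse[i] < (pvSeg s sp ep)[i] then false
          else pvInnerA s sp ep ((i : Int) + 1)) = _
    simp only [pvLexLt]
    have hcast : ((i : Int) + 1) = (((i + 1 : Nat)) : Int) := by push_cast; ring
    rw [hcast, ih (i + 1) (by omega)]

theorem pvSeg_tail (s : List Char) (sp ep : Int) (h0 : 0 ≤ sp) (hlen : ep < (s.length : Int)) :
    pvSeg s (sp + 1) ep = (pvSeg s sp ep).tail := by
  apply List.ext_getElem
  · rw [pvSeg_length s (sp+1) ep (by omega) hlen, List.length_tail,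
      pvSeg_length s sp ep h0 hlen]
    omega
  · intro j h1 h2
    rw [List.getElem_tail]
    rw [pvSeg_getElem s (sp+1) ep (by omega) j h1,
      pvSeg_getElem s sp ep h0 (j+1) (by rw [List.length_tail] at h2; omega)]
    congr 1
    omega

theorem pvSeg_dropLast (s : List Char) (sp ep : Int) (h0 : 0 ≤ sp) (hlen : ep < (s.length : Int)) :
    pvSeg s sp (ep - 1) = (pvSeg s sp ep).dropLast := by
  apply List.ext_getElem
  · rw [pvSeg_length s sp (ep-1) h0 (by omega), List.length_dropLast,
      pvSeg_length s sp ep h0 hlen]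
    omega
  · intro j h1 h2
    rw [List.getElem_dropLast]
    rw [pvSeg_getElem s sp (ep-1) h0 j h1,
      pvSeg_getElem s sp ep h0 j (by rw [List.length_dropLast] at h2; omega)]

theorem pvOuterA_eq_goB (s : List Char) (sp ep : Int) (acc : List Char)
    (h0 : 0 ≤ sp) (hlen : ep < (s.length : Int)) :
    pvOuterA s sp ep acc = acc ++ pvGoB (pvSeg s sp ep) := by
  induction hd : (ep + 1 - sp).toNat generalizing sp ep acc with
  | zero =>
    have hcase : ¬ sp ≤ ep := by omega
    unfold pvOuterA
    rw [dif_neg hcase]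
    have hnil : pvSeg s sp ep = [] := by
      have := pvSeg_length s sp ep h0 hlen
      exact List.eq_nil_of_length_eq_zero (by omega)
    rw [hnil]
    simp [pvGoB]
  | succ k ih =>
    have hcase : sp ≤ ep := by omega
    have hn := pvSeg_length s sp ep h0 hlen
    have hpos : 0 < (pvSeg s sp ep).length := by omega
    have h00 := pvInnerA_eq_lex s sp ep h0 hlen 0
    simp only [Nat.cast_zero, List.drop_zero] at h00
    unfold pvOuterA
    rw [dif_pos hcase]
    cases hseg : pvSeg s sp ep with
    | nil => rw [hseg] at hpos; simp at hpos
    | cons c rest =>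
      rw [hseg] at h00
      rw [h00]
      rw [pvGoB]
      cases hb : pvLexLt (c :: rest) (c :: rest).reverse with
      | true =>
        simp only [if_true]
        have hq1 : (pvSeg s sp ep)[0]? = some c := by rw [hseg]; rfl
        have hq2 : (pvSeg s sp ep)[0]? = some (s[sp.toNat]'(by omega)) := by
          rw [List.getElem?_eq_getElem hpos, pvSeg_getElem s sp ep h0 0 hpos]
          simp
        have hgs : PySem.List.pyGet? s sp = some c := by
          rw [PySem.List.pyGet?_eq_some_getElem s (i := sp) h0 (by omega)]
          rw [← hq1, hq2]
        rw [hgs]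
        show pvOuterA s (sp + 1) ep (acc ++ [c]) = _
        rw [ih (sp + 1) ep (acc ++ [c]) (by omega) hlen (by omega)]
        rw [pvSeg_tail s sp ep h0 hlen, hseg]
        simp
      | false =>
        simp only [if_false, Bool.false_eq_true]
        have hj : (pvSeg s sp ep).length - 1 < (pvSeg s sp ep).length := by omega
        have hq1 : (pvSeg s sp ep)[(pvSeg s sp ep).length - 1]? =
            some ((c :: rest).getLast (by simp)) := by
          rw [List.getElem?_eq_getElem hj, List.getLast_eq_getElem]
          exact congrArg some (by congr 1 <;> rw [hseg])
        have hq2 : (pvSeg s sp ep)[(pvSeg s sp ep).length - 1]? =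
            some (s[ep.toNat]'(by omega)) := by
          rw [List.getElem?_eq_getElem hj, pvSeg_getElem s sp ep h0 _ hj]
          exact congrArg some (by congr 1; omega)
        have hlast : PySem.List.pyGet? s ep = some ((c :: rest).getLast (by simp)) := by
          rw [PySem.List.pyGet?_eq_some_getElem s (i := ep) (by omega) (by omega)]
          rw [← hq2, hq1]
        rw [hlast]
        show pvOuterA s sp (ep - 1) (acc ++ [(c :: rest).getLast (by simp)]) = _
        rw [ih sp (ep - 1) (acc ++ [(c :: rest).getLast (by simp)]) h0 (by omega) (by omega)]
        rw [pvSeg_dropLast s sp ep h0 hlen, hseg]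
        simp

-- ===== VERDICT (by name: the statement is the Claim_ definition above) =====
theorem main_method_spec : Claim_equal_main_method := by
  intro N S _hD hPre
  have hP : N ≤ (S.toList.length : Int) := hPre
  unfold Spec_main_method main_method main_method_alt
  rw [pvOuterA_eq_goB S.toList 0 (N - 1) [] (by omega) (by omega)]
  have hseg : pvSeg S.toList 0 (N - 1) = (if 0 < N then S.toList.take N.toNat else []) := by
    unfold pvSeg
    split_ifs with h
    · have hN : (N - 1 + 1 - 0).toNat = N.toNat := by omega
      rw [hN]
      simp
    · have h0 : (N - 1 + 1 - 0).toNat = 0 := by omega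
      rw [h0]
      simp
  rw [hseg]
  simp
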